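-- pv_equiv track=rewrite | github.com/an10nimus/MyCodeForces | Round_640_Div_4/E/E.py | solve
-- ===== SOURCE A (Python) =====
-- def solve(array):
--     nums = [0]*8001
--     counted = [False]*8001
--     tmp = 0
--     limit = 0
--     length = len(array)
--     for i in range(length):
--         nums[array[i]] += 1
--         if limit < array[i]:
--             limit = array[i]
--     for i in range(length-1):
--         candidate = array[i] + array[i+1]
--         j = i+1
--         while (j < length) and (candidate <= limit):
--             if not counted[candidate]:
--                 tmp += nums[candidate]
--                 counted[candidate] = True
--             j += 1
--             if j < length:
--                 candidate += array[j]
--     return tmp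
-- ===== SOURCE B (Python) =====
-- def solve(array):
--     def has_window(x):
--         s, l = 0, 0
--         for r in range(len(array)):
--             s += array[r]
--             while l <= r and s > x:
--                 s -= array[l]
--                 l += 1
--             if s == x and r - l >= 1:
--                 return True
--         return False
--     cache = {}
--     count = 0
--     for x in array:
--         if x not in cache:
--             cache[x] = has_window(x)
--         if cache[x]:
--             count += 1
--     return count
-- ===== Notes on version B (the rewrite author's own statement) =====
-- stated objective: alternative
-- what changed: B counts elements by deciding each one with a two-pointer sliding-window test (shrink the left end while the running sum exceeds the target, valid because window sums are monotone on nonnegative input), replacing A's enumerate-all-window-sums crediting through fixed 8001-slot count/flag tables.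
-- outside the precondition, e.g. on solve([8000, -8000, -1]): A returns 2, B returns 0
import Mathlib
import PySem

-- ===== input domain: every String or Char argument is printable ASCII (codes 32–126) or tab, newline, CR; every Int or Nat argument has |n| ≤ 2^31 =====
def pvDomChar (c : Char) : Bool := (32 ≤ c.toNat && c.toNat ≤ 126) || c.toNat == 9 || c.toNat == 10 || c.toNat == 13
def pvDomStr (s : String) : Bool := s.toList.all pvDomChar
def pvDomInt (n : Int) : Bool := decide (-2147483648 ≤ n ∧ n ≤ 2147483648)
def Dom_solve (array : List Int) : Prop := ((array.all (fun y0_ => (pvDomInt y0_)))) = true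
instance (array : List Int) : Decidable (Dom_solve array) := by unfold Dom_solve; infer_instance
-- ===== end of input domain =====

-- B decides, for each element, whether some length-≥2 window sums to it with a two-pointer
-- sliding-window test (monotone window sums on nonnegative input), instead of A's
-- enumerate-all-window-sums crediting through fixed count/flag tables (objective: alternative).

-- ===== PORT A =====
-- inner 'while (j < length) and (candidate <= limit)' loop of A; the loop runs at most
-- length - j ≤ length times (j increases by one each iteration), so fuel = array.length suffices.
def solveWhileA (array nums : List Int) (limit : Int) :
    Nat → Int → Int → List Bool → Int → List Bool × Int
  | 0, _, _, counted, tmp => (counted, tmp)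
  | fuel+1, j, candidate, counted, tmp =>
    if j < (array.length : Int) ∧ candidate ≤ limit then
      let st :=
        if PySem.List.pyGetD counted candidate false = false then
          (PySem.List.pySetD counted candidate true,
           tmp + PySem.List.pyGetD nums candidate 0)
        else (counted, tmp)
      let j' := j + 1
      let candidate' :=
        if j' < (array.length : Int) then candidate + PySem.List.pyGetD array j' 0 else candidate
      solveWhileA array nums limit fuel j' candidate' st.1 st.2
    else (counted, tmp)

-- first loop: 'for i in range(length): nums[array[i]] += 1; if limit < array[i]: limit = array[i]'
def solveLoop1 (array : List Int) : List Int × Int :=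
  (PySem.List.pyRange 0 (array.length : Int) 1).foldl
    (fun (st : List Int × Int) i =>
      (PySem.List.pySetD st.1 (PySem.List.pyGetD array i 0)
         (PySem.List.pyGetD st.1 (PySem.List.pyGetD array i 0) 0 + 1),
       if st.2 < PySem.List.pyGetD array i 0 then PySem.List.pyGetD array i 0 else st.2))
    (List.replicate 8001 0, 0)

-- pyGetD/pySetD are exact on in-range indices; Pre_solve puts every index used in [0, 8000]
def solve (array : List Int) : Int :=
  let s1 := solveLoop1 array
  ((PySem.List.pyRange 0 ((array.length : Int) - 1) 1).foldl
      (fun (st : List Bool × Int) i =>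
        solveWhileA array s1.1 s1.2 array.length (i+1)
          (PySem.List.pyGetD array i 0 + PySem.List.pyGetD array (i+1) 0) st.1 st.2)
      (List.replicate 8001 false, 0)).2

-- ===== PORT B =====
-- 'while l <= r and s > x: s -= array[l]; l += 1' — l grows by one per iteration and the
-- loop stops past r, so fuel = array.length + 1 suffices (the fuel guard only totalises it)
def shrinkB (array : List Int) (x r : Int) : Nat → Int → Int → Int × Int
  | 0, s, l => (s, l)
  | fuel+1, s, l =>
    if l ≤ r ∧ x < s then shrinkB array x r fuel (s - PySem.List.pyGetD array l 0) (l + 1)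
    else (s, l)

-- 'for r in range(len(array)): s += array[r]; <while>; if s == x and r - l >= 1: return True'
def hwLoopB (array : List Int) (x : Int) : List Int → Int → Int → Bool
  | [], _, _ => false
  | r :: rest, s, l =>
    let s1 := s + PySem.List.pyGetD array r 0
    let p := shrinkB array x r (array.length + 1) s1 l
    if p.1 = x ∧ 1 ≤ r - p.2 then true
    else hwLoopB array x rest p.1 p.2

-- 'def has_window(x): ...' as a whole
def hasWindowB (array : List Int) (x : Int) : Bool :=
  hwLoopB array x (PySem.List.pyRange 0 (array.length : Int) 1) 0 0

-- 'for x in array: if x not in cache: cache[x] = has_window(x); if cache[x]: count += 1'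
def solveAltLoop (array : List Int) : List Int → PySem.Dict Int Bool → Int → Int
  | [], _, count => count
  | x :: rest, cache, count =>
    let cache1 := if PySem.Dict.contains cache x = false
      then PySem.Dict.insert cache x (hasWindowB array x) else cache
    -- 'cache[x]': x is a key of cache1 by construction, so KeyError cannot occur; getD false is exact here
    let count1 := if (PySem.Dict.get? cache1 x).getD false then count + 1 else count
    solveAltLoop array rest cache1 count1

def solve_alt (array : List Int) : Int :=
  solveAltLoop array array PySem.Dict.empty 0

-- ===== PRECONDITION & SPEC =====
-- Pre_solve excludes arrays of length ≥ 2 with an element outside [0, 8000]: elements outside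
-- [-8001, 8000] (or negative runs driving a window sum below -8001) make A raise IndexError,
-- and in-range negative elements make A's nums/counted indexing wrap around mod 8001 — an
-- artefact of the fixed 8001-slot tables that can credit unrelated elements and which B does
-- not reproduce; arrays of length ≤ 1 are kept whenever A returns (it returns 0, as does B).
def Pre_solve (array : List Int) : Prop :=
  (∀ x ∈ array, 0 ≤ x ∧ x ≤ 8000) ∨
  (array.length ≤ 1 ∧ ∀ x ∈ array, -8001 ≤ x ∧ x ≤ 8000)
instance (array : List Int) : Decidable (Pre_solve array) := by unfold Pre_solve; infer_instance
def pvWitness_solve : List Int := [1, 2, 3, 3]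
def Spec_solve (array : List Int) (out : Int) : Prop := out = solve_alt array
instance (array : List Int) (out : Int) : Decidable (Spec_solve array out) := by unfold Spec_solve; infer_instance

-- ===== CLAIM (what is proved, stated in full; the proofs are below) =====
def Claim_equal_solve : Prop := ∀ (array : List Int), Dom_solve array → Pre_solve array → Spec_solve array (solve array)

-- ===== LEMMAS AND PROOFS =====

-- ghost enumeration of A's achievable window sums (proof device only): from start i the
-- window extends while the running sum stays ≤ mx, collecting each sum into a set
def ghostInner (array : List Int) (mx : Int) :
    Nat → Int → Int → PySem.Set Int → PySem.Set Int
  | 0, _, _, ach => ach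
  | fuel+1, j, s, ach =>
    if j < (array.length : Int) then
      let s' := s + PySem.List.pyGetD array j 0
      if mx < s' then ach
      else ghostInner array mx fuel (j+1) s' (PySem.Set.add ach s')
    else ach

-- the 8001-slot tables A maintains, as functions of the ghost set / of the array
def flagTable (ach : List Int) : List Bool :=
  (List.range 8001).map (fun k => PySem.Set.contains ach ((k : Nat) : Int))
def numsTable (array : List Int) : List Int :=
  (List.range 8001).map (fun k => ((array.count ((k : Nat) : Int) : Nat) : Int))

-- prefix sums: window array[i..j] (inclusive) sums to pref (j+1) - pref i
def pref (a : List Int) (k : Nat) : Int := ((a.take k).sum)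

-- 'some window of length ≥ 2 sums to x'
def HasWin (a : List Int) (x : Int) : Prop :=
  ∃ i j : Nat, i < j ∧ j < a.length ∧ pref a (j+1) - pref a i = x

theorem table_get {α : Type} (f : Nat → α) (n : Nat) (c : Int) (d : α)
    (h0 : 0 ≤ c) (h1 : c < (n : Int)) :
    PySem.List.pyGetD ((List.range n).map f) c d = f c.toNat := by
  rw [PySem.List.pyGetD_eq_getElem _ _ h0
    (by simp only [List.length_map, List.length_range]; exact_mod_cast h1)]
  simp only [List.getElem_map, List.getElem_range]

theorem table_set {α : Type} (f : Nat → α) (n : Nat) (c : Int) (v : α)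
    (h0 : 0 ≤ c) (_h1 : c < (n : Int)) :
    PySem.List.pySetD ((List.range n).map f) c v
      = (List.range n).map (fun k => if k = c.toNat then v else f k) := by
  rw [PySem.List.pySetD_of_nonneg _ _ h0]
  apply List.ext_getElem (by simp)
  intro i hi1 hi2
  simp only [List.getElem_set, List.getElem_map, List.getElem_range] at hi1 hi2 ⊢
  by_cases h : c.toNat = i
  · simp [h]
  · rw [if_neg h, if_neg (fun hh => h (Eq.symm hh))]

theorem contains_bool (s : List Int) (x : Int) :
    PySem.Set.contains s x = decide (x ∈ s) := by
  simp [PySem.Set.contains_eq_listContains]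

theorem contains_add (ach : List Int) (c x : Int) :
    PySem.Set.contains (PySem.Set.add ach c) x
      = (PySem.Set.contains ach x || decide (x = c)) := by
  simp only [contains_bool]
  by_cases h : x ∈ PySem.Set.add ach c <;>
    simp_all [PySem.Set.mem_add]

theorem flag_get (ach : List Int) (c : Int) (h0 : 0 ≤ c) (h1 : c ≤ 8000) :
    PySem.List.pyGetD (flagTable ach) c false = PySem.Set.contains ach c := by
  rw [flagTable, table_get _ _ _ _ h0 (by omega)]
  rw [Int.toNat_of_nonneg h0]

theorem flag_set (ach : List Int) (c : Int) (h0 : 0 ≤ c) (h1 : c ≤ 8000) :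
    PySem.List.pySetD (flagTable ach) c true = flagTable (PySem.Set.add ach c) := by
  rw [flagTable, table_set _ _ _ _ h0 (by omega)]
  unfold flagTable
  apply List.map_congr_left
  intro k hk
  rw [contains_add]
  by_cases h : k = c.toNat
  · subst h; simp [Int.toNat_of_nonneg h0]
  · have : ((k : Nat) : Int) ≠ c := by omega
    simp [h, this]

theorem nums_get (array : List Int) (c : Int) (h0 : 0 ≤ c) (h1 : c ≤ 8000) :
    PySem.List.pyGetD (numsTable array) c 0 = ((array.count c : Nat) : Int) := by
  rw [numsTable, table_get _ _ _ _ h0 (by omega), Int.toNat_of_nonneg h0]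

theorem countP_add (array ach : List Int) (c : Int) (hc : c ∉ ach) :
    array.countP (fun x => PySem.Set.contains (PySem.Set.add ach c) x)
      = array.countP (fun x => PySem.Set.contains ach x) + array.count c := by
  induction array with
  | nil => simp
  | cons a t ih =>
    simp only [List.countP_cons, List.count_cons, contains_bool] at *
    by_cases h1 : a = c <;> by_cases h2 : a ∈ ach <;> simp_all <;> omega

theorem flag_empty : List.replicate 8001 false = flagTable [] := by
  have h : ∀ k : Nat, PySem.Set.contains ([] : List Int) ((k : Nat) : Int) = false :=
    fun _ => rfl
  simp only [flagTable, h, List.map_const', List.length_range]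

theorem nums_empty : List.replicate 8001 (0 : Int) = numsTable [] := by
  simp only [numsTable, List.count_nil, Nat.cast_zero, List.map_const', List.length_range]

theorem countP_empty (array : List Int) :
    array.countP (fun x => PySem.Set.contains ([] : List Int) x) = 0 := by
  simp

theorem nums_step (ys : List Int) (x : Int) (h0 : 0 ≤ x) (h1 : x ≤ 8000) :
    PySem.List.pySetD (numsTable ys) x (PySem.List.pyGetD (numsTable ys) x 0 + 1)
      = numsTable (ys ++ [x]) := by
  rw [numsTable, table_get _ _ _ _ h0 (by omega), table_set _ _ _ _ h0 (by omega)]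
  unfold numsTable
  apply List.map_congr_left
  intro k hk
  by_cases h : k = x.toNat
  · subst h
    simp [Int.toNat_of_nonneg h0, List.count_append]
  · have hne : x ≠ ((k : Nat) : Int) := by omega
    simp [h, List.count_append, hne]

theorem ite_lt_eq_max (l a : Int) : (if l < a then a else l) = max l a := by
  rcases le_or_gt a l with h | h <;> simp [max_def] <;> omega

theorem loop1_eq (xs : List Int) : ∀ (ys : List Int) (l0 : Int),
    (∀ x ∈ xs, 0 ≤ x ∧ x ≤ 8000) →
    xs.foldl (fun (st : List Int × Int) a =>
        (PySem.List.pySetD st.1 a (PySem.List.pyGetD st.1 a 0 + 1),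
         if st.2 < a then a else st.2)) (numsTable ys, l0)
      = (numsTable (ys ++ xs), List.foldl max l0 xs) := by
  induction xs with
  | nil => intro ys l0 _; simp
  | cons x t ih =>
    intro ys l0 hb
    obtain ⟨hx0, hx8⟩ := hb x (by simp)
    simp only [List.foldl_cons]
    rw [nums_step ys x hx0 hx8, ite_lt_eq_max,
        ih (ys ++ [x]) (max l0 x) (fun y hy => hb y (by simp [hy]))]
    simp

set_option maxRecDepth 100000 in
theorem inner_eq (array nums : List Int) (limit : Int)
    (hpre : ∀ x ∈ array, 0 ≤ x)
    (hl8 : limit ≤ 8000)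
    (hnums : ∀ c : Int, 0 ≤ c → c ≤ 8000 →
      PySem.List.pyGetD nums c 0 = ((array.count c : Nat) : Int)) :
    ∀ (fuel : Nat) (j s c : Int) (ach : List Int),
      0 ≤ j → 0 ≤ s →
      (j < (array.length : Int) → c = s + PySem.List.pyGetD array j 0) →
      solveWhileA array nums limit fuel j c (flagTable ach)
          ((array.countP (fun x => PySem.Set.contains ach x) : Nat) : Int)
        = (flagTable (ghostInner array limit fuel j s ach),
           ((array.countP (fun x =>
               PySem.Set.contains (ghostInner array limit fuel j s ach) x) : Nat) : Int)) := by
  intro fuel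
  induction fuel with
  | zero =>
    intro j s c ach _ _ _
    simp [solveWhileA, ghostInner]
  | succ fuel ih =>
    intro j s c ach hj hs hc
    by_cases hjl : j < (array.length : Int)
    · have hcc : c = s + PySem.List.pyGetD array j 0 := hc hjl
      have hmem : PySem.List.pyGetD array j 0 ∈ array :=
        PySem.List.pyGetD_mem array 0 ⟨by omega, hjl⟩
      have haj : 0 ≤ PySem.List.pyGetD array j 0 := hpre _ hmem
      have hc0 : 0 ≤ c := by omega
      by_cases hcl : c ≤ limit
      · -- the while body runs, and the ghost enumeration does not break
        rw [solveWhileA, ghostInner, if_pos hjl,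
            if_neg (show ¬ limit < s + PySem.List.pyGetD array j 0 by omega),
            if_pos ⟨hjl, hcl⟩]
        rw [flag_get ach c hc0 (by omega), contains_bool]
        rw [← hcc]
        by_cases hm : c ∈ ach
        · -- candidate already counted: A skips, the ghost add is a no-op
          rw [if_neg (by simp [hm])]
          rw [PySem.Set.add_of_mem hm]
          exact ih (j+1) c _ ach (by omega) hc0
            (fun h => by rw [if_pos h])
        · -- fresh candidate: A credits nums[c] and marks it, the ghost adds it to the set
          rw [if_pos (by simp [hm])]
          have hst1 : PySem.List.pySetD (flagTable ach) c true
              = flagTable (PySem.Set.add ach c) := flag_set ach c hc0 (by omega)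
          have hst2 : ((array.countP (fun x => PySem.Set.contains ach x) : Nat) : Int)
                + PySem.List.pyGetD nums c 0
              = ((array.countP (fun x =>
                  PySem.Set.contains (PySem.Set.add ach c) x) : Nat) : Int) := by
            rw [hnums c hc0 (by omega), countP_add array ach c hm]
            push_cast
            ring
          simp only [hst1, hst2]
          exact ih (j+1) c _ (PySem.Set.add ach c) (by omega) hc0
            (fun h => by rw [if_pos h])
      · -- candidate exceeds the limit: the while condition fails, the ghost breaks
        rw [solveWhileA, ghostInner, if_pos hjl,
            if_pos (show limit < s + PySem.List.pyGetD array j 0 by omega),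
            if_neg (by tauto)]
    · -- j ≥ length: both loops stop
      rw [solveWhileA, ghostInner, if_neg hjl, if_neg (by tauto)]

set_option maxRecDepth 100000 in
theorem outer_eq (array nums : List Int) (limit : Int)
    (hpre : ∀ x ∈ array, 0 ≤ x)
    (hl8 : limit ≤ 8000)
    (hnums : ∀ c : Int, 0 ≤ c → c ≤ 8000 →
      PySem.List.pyGetD nums c 0 = ((array.count c : Nat) : Int)) :
    ∀ (l : List Int) (ach : List Int),
      (∀ i ∈ l, 0 ≤ i ∧ i < (array.length : Int)) →
      l.foldl (fun (st : List Bool × Int) i =>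
          solveWhileA array nums limit array.length (i+1)
            (PySem.List.pyGetD array i 0 + PySem.List.pyGetD array (i+1) 0) st.1 st.2)
        (flagTable ach, ((array.countP (fun x => PySem.Set.contains ach x) : Nat) : Int))
      = (flagTable (l.foldl (fun ach i =>
            ghostInner array limit array.length (i+1) (PySem.List.pyGetD array i 0) ach) ach),
         ((array.countP (fun x => PySem.Set.contains (l.foldl (fun ach i =>
            ghostInner array limit array.length (i+1) (PySem.List.pyGetD array i 0) ach) ach) x) : Nat) : Int)) := by
  intro l
  induction l with
  | nil => intro ach _; simp
  | cons i t iht =>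
    intro ach hb
    obtain ⟨hi0, hil⟩ := hb i (by simp)
    have hs0 : 0 ≤ PySem.List.pyGetD array i 0 :=
      hpre _ (PySem.List.pyGetD_mem array 0 ⟨by omega, hil⟩)
    simp only [List.foldl_cons]
    rw [inner_eq array nums limit hpre hl8 hnums array.length (i+1)
        (PySem.List.pyGetD array i 0)
        (PySem.List.pyGetD array i 0 + PySem.List.pyGetD array (i+1) 0) ach
        (by omega) hs0 (fun _ => rfl)]
    exact iht _ (fun y hy => hb y (by simp [hy]))

-- A) solve computes the count of elements lying in the ghost set (reassembly of the two loops)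
theorem solve_eq_ghost (x : Int) (t : List Int)
    (hpre : ∀ y ∈ x :: t, 0 ≤ y ∧ y ≤ 8000) :
    solve (x :: t)
      = ((List.countP (fun y => PySem.Set.contains
          ((PySem.List.pyRange 0 (((x :: t).length : Int) - 1) 1).foldl
            (fun ach i => ghostInner (x :: t) (List.foldl max 0 (x :: t)) (x :: t).length (i+1)
              (PySem.List.pyGetD (x :: t) i 0) ach) ([] : List Int)) y) (x :: t) : Nat) : Int) := by
  have hx0 : (0:Int) ≤ x := (hpre x (by simp)).1
  have hpre1 : ∀ y ∈ x :: t, (0:Int) ≤ y := fun y hy => (hpre y hy).1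
  have hlim8 : List.foldl max 0 (x :: t) ≤ 8000 := by
    rcases PySem.List.foldl_max_mem (x :: t) 0 with h | h
    · omega
    · exact (hpre _ h).2
  have hloop1 : solveLoop1 (x :: t) = (numsTable (x :: t), List.foldl max 0 (x :: t)) := by
    rw [solveLoop1, PySem.List.foldl_pyRange_zero_pyGetD' (x :: t) 0
      (fun (st : List Int × Int) a =>
        (PySem.List.pySetD st.1 a (PySem.List.pyGetD st.1 a 0 + 1),
         if st.2 < a then a else st.2)) (List.replicate 8001 0, 0)]
    rw [nums_empty]
    simpa using loop1_eq (x :: t) [] 0 hpre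
  have hA : solve (x :: t) = ((PySem.List.pyRange 0 (((x :: t).length : Int) - 1) 1).foldl
      (fun (st : List Bool × Int) i =>
        solveWhileA (x :: t) (numsTable (x :: t)) (List.foldl max 0 (x :: t)) (x :: t).length (i+1)
          (PySem.List.pyGetD (x :: t) i 0 + PySem.List.pyGetD (x :: t) (i+1) 0) st.1 st.2)
      (List.replicate 8001 false, 0)).2 := by
    rw [solve, hloop1]
  have hinit : (List.replicate 8001 false, (0:Int))
      = (flagTable [],
         ((List.countP (fun y => PySem.Set.contains ([] : List Int) y) (x :: t) : Nat) : Int)) := by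
    rw [flag_empty, countP_empty]; rfl
  rw [hA, hinit,
      outer_eq (x :: t) (numsTable (x :: t)) (List.foldl max 0 (x :: t)) hpre1 hlim8
        (fun c h0 h8 => nums_get (x :: t) c h0 h8)
        (PySem.List.pyRange 0 (((x :: t).length : Int) - 1) 1) []
        (fun i hi => by
          have h := PySem.List.mem_pyRange_one.mp hi
          have : 1 ≤ ((x :: t).length : Int) := by simp
          exact ⟨h.1, by omega⟩)]

-- B) prefix sums
theorem pref_succ (a : List Int) (k : Nat) (hk : k < a.length) :
    pref a (k+1) = pref a k + a[k] := by
  exact List.sum_take_succ a k hk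

theorem pref_getElem_nonneg (a : List Int) (hn : ∀ y ∈ a, 0 ≤ y) (k : Nat)
    (hk : k < a.length) : 0 ≤ a[k] :=
  hn _ (List.getElem_mem hk)

theorem pref_mono (a : List Int) (hn : ∀ y ∈ a, 0 ≤ y) (i : Nat) :
    ∀ j : Nat, i ≤ j → j ≤ a.length → pref a i ≤ pref a j := by
  intro j
  induction j with
  | zero => intro hij _; have : i = 0 := by omega
            simp [this]
  | succ j ih =>
    intro hij hj
    rcases Nat.lt_or_ge i (j+1) with h | h
    · have h1 : pref a i ≤ pref a j := ih (by omega) (by omega)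
      have h2 := pref_succ a j (by omega)
      have h3 := pref_getElem_nonneg a hn j (by omega)
      omega
    · have : i = j + 1 := by omega
      simp [this]

-- C) membership in the ghost enumeration: exactly the window sums ≤ mx
theorem ghostInner_mem (a : List Int) (mx : Int) (hn : ∀ y ∈ a, 0 ≤ y) :
    ∀ (fuel i j : Nat) (ach : PySem.Set Int) (y : Int),
      a.length ≤ fuel + j → i < j →
      (y ∈ ghostInner a mx fuel (j : Int) (pref a j - pref a i) ach ↔
        y ∈ ach ∨ ∃ j' : Nat, j ≤ j' ∧ j' < a.length ∧ pref a (j'+1) - pref a i = y ∧ y ≤ mx) := by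
  intro fuel
  induction fuel with
  | zero =>
    intro i j ach y hf hij
    simp only [ghostInner]
    constructor
    · exact Or.inl
    · rintro (h | ⟨j', h1, h2, _, _⟩)
      · exact h
      · omega
  | succ fuel ih =>
    intro i j ach y hf hij
    by_cases hjl : (j : Int) < (a.length : Int)
    · have hjn : j < a.length := by exact_mod_cast hjl
      have hget : PySem.List.pyGetD a (j : Int) 0 = a[j] := by
        rw [PySem.List.pyGetD_natCast]
        exact List.getD_eq_getElem a 0 hjn
      have hps := pref_succ a j hjn
      rw [ghostInner, if_pos hjl]
      simp only [hget]
      by_cases hmx : mx < pref a j - pref a i + a[j]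
      · rw [if_pos hmx]
        constructor
        · exact Or.inl
        · rintro (h | ⟨j', hjj', hj'l, heq, hmxle⟩)
          · exact h
          · exfalso
            have hm : pref a (j+1) ≤ pref a (j'+1) :=
              pref_mono a hn (j+1) (j'+1) (by omega) (by omega)
            have h1 : mx < pref a (j+1) - pref a i := by omega
            omega
      · rw [if_neg hmx]
        have hcast : (j : Int) + 1 = ((j + 1 : Nat) : Int) := by push_cast; ring
        have hs' : pref a j - pref a i + a[j] = pref a (j+1) - pref a i := by omega
        rw [hcast, hs',
            ih i (j+1) (PySem.Set.add ach (pref a (j+1) - pref a i)) y (by omega) (by omega),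
            PySem.Set.mem_add]
        constructor
        · rintro ((h | h) | ⟨j', h1, h2, h3, h4⟩)
          · exact Or.inl h
          · exact Or.inr ⟨j, le_refl j, hjn, by omega, by omega⟩
          · exact Or.inr ⟨j', by omega, h2, h3, h4⟩
        · rintro (h | ⟨j', h1, h2, h3, h4⟩)
          · exact Or.inl (Or.inl h)
          · rcases Nat.eq_or_lt_of_le h1 with he | hlt
            · exact Or.inl (Or.inr (by rw [← he] at h3; omega))
            · exact Or.inr ⟨j', by omega, h2, h3, h4⟩
    · rw [ghostInner, if_neg hjl]
      have hlen : a.length ≤ j := by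
        have := not_lt.mp hjl; exact_mod_cast this
      constructor
      · exact Or.inl
      · rintro (h | ⟨j', h1, h2, _, _⟩)
        · exact h
        · omega

theorem ghost_fold_mem (a : List Int) (mx : Int) (hn : ∀ y ∈ a, 0 ≤ y) :
    ∀ (L : List Int) (ach : PySem.Set Int) (y : Int),
      (∀ i ∈ L, 0 ≤ i ∧ i + 1 < (a.length : Int)) →
      (y ∈ L.foldl (fun ach i =>
          ghostInner a mx a.length (i+1) (PySem.List.pyGetD a i 0) ach) ach ↔
        y ∈ ach ∨ ∃ i2 ∈ L, ∃ j' : Nat, i2.toNat < j' ∧ j' < a.length ∧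
          pref a (j'+1) - pref a i2.toNat = y ∧ y ≤ mx) := by
  intro L
  induction L with
  | nil => intro ach y _; simp
  | cons i2 t ih =>
    intro ach y hb
    obtain ⟨hi0, hil⟩ := hb i2 (by simp)
    have hin : i2.toNat < a.length := by omega
    have hcast : (i2 : Int) + 1 = ((i2.toNat + 1 : Nat) : Int) := by omega
    have hget : PySem.List.pyGetD a i2 0 = pref a (i2.toNat + 1) - pref a i2.toNat := by
      rw [PySem.List.pyGetD_eq_getElem a 0 hi0 (by omega), pref_succ a i2.toNat hin]
      omega
    simp only [List.foldl_cons]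
    rw [ih _ y (fun i hi => hb i (by simp [hi])), hcast, hget,
        ghostInner_mem a mx hn a.length i2.toNat (i2.toNat + 1) ach y (by omega) (by omega)]
    constructor
    · rintro ((h | ⟨j', h1, h2, h3, h4⟩) | ⟨i3, h5, h6⟩)
      · exact Or.inl h
      · exact Or.inr ⟨i2, by simp, j', by omega, h2, h3, h4⟩
      · exact Or.inr ⟨i3, by simp [h5], h6⟩
    · rintro (h | ⟨i3, h5, h6⟩)
      · exact Or.inl (Or.inl h)
      · rcases List.mem_cons.mp h5 with he | hm
        · subst he
          obtain ⟨j', h1, h2, h3, h4⟩ := h6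
          exact Or.inl (Or.inr ⟨j', by omega, h2, h3, h4⟩)
        · exact Or.inr ⟨i3, hm, h6⟩

-- D) the two-pointer while loop: minimal left end with window sum ≤ x
theorem shrinkB_spec (a : List Int) (x : Int) (_hn : ∀ y ∈ a, 0 ≤ y) (hx : 0 ≤ x)
    (e : Nat) (he : e ≤ a.length) (r : Int) (hre : (e : Int) = r + 1) :
    ∀ (fuel l : Nat), l ≤ e → e ≤ fuel + l →
      ∃ l' : Nat, shrinkB a x r fuel (pref a e - pref a l) (l : Int) = (pref a e - pref a l', (l' : Int)) ∧
        l ≤ l' ∧ l' ≤ e ∧ pref a e - pref a l' ≤ x ∧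
        ∀ i : Nat, l ≤ i → i < l' → x < pref a e - pref a i := by
  intro fuel
  induction fuel with
  | zero =>
    intro l hle hfl
    have hl : l = e := by omega
    refine ⟨l, ?_, le_refl l, hle, by rw [hl]; omega, fun i h1 h2 => by omega⟩
    simp [shrinkB]
  | succ fuel ih =>
    intro l hle hfl
    by_cases hgt : x < pref a e - pref a l
    · have hlt : l < e := by
        by_contra hc
        have : l = e := by omega
        rw [this] at hgt
        omega
      have hguard : ((l : Int) ≤ r ∧ x < pref a e - pref a l) := ⟨by omega, hgt⟩
      have hget : PySem.List.pyGetD a (l : Int) 0 = a[l] := by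
        rw [PySem.List.pyGetD_natCast]
        exact List.getD_eq_getElem a 0 (by omega)
      have hps := pref_succ a l (by omega)
      have hstep : pref a e - pref a l - a[l] = pref a e - pref a (l+1) := by omega
      have hcast : (l : Int) + 1 = ((l + 1 : Nat) : Int) := by push_cast; ring
      rw [shrinkB, if_pos hguard, hget, hstep, hcast]
      obtain ⟨l', he1, he2, he3, he4, he5⟩ := ih (l+1) (by omega) (by omega)
      refine ⟨l', he1, by omega, he3, he4, fun i h1 h2 => ?_⟩
      rcases Nat.eq_or_lt_of_le h1 with hi | hi
      · rw [← hi]; exact hgt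
      · exact he5 i (by omega) h2
    · rw [shrinkB, if_neg (fun h => hgt h.2)]
      exact ⟨l, rfl, le_refl l, hle, by omega, fun i h1 h2 => by omega⟩

-- E) two-pointer main loop invariant
theorem hwLoopB_inv (a : List Int) (x : Int) (hn : ∀ y ∈ a, 0 ≤ y) (hx : 0 ≤ x) :
    ∀ (k r0 l : Nat), r0 + k = a.length → l ≤ r0 →
      (∀ i : Nat, i < l → x < pref a r0 - pref a i) →
      (hwLoopB a x (PySem.List.pyRange (r0 : Int) (a.length : Int) 1)
          (pref a r0 - pref a l) (l : Int) = true ↔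
        ∃ i j : Nat, i < j ∧ j < a.length ∧ r0 ≤ j ∧ pref a (j+1) - pref a i = x) := by
  intro k
  induction k with
  | zero =>
    intro r0 l hr hl _
    rw [PySem.List.pyRange_one_eq_nil (by omega)]
    simp only [hwLoopB]
    constructor
    · intro h; exact absurd h (by simp)
    · rintro ⟨i, j, _, h2, h3, _⟩; omega
  | succ k ih =>
    intro r0 l hr hl hmin
    have hr0 : r0 < a.length := by omega
    rw [PySem.List.pyRange_one_cons (by omega)]
    simp only [hwLoopB]
    have hget : PySem.List.pyGetD a (r0 : Int) 0 = a[r0] := by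
      rw [PySem.List.pyGetD_natCast]
      exact List.getD_eq_getElem a 0 hr0
    have hps := pref_succ a r0 hr0
    have hs1 : pref a r0 - pref a l + PySem.List.pyGetD a (r0 : Int) 0
        = pref a (r0+1) - pref a l := by rw [hget]; omega
    rw [hs1]
    obtain ⟨l', hpe, hl1, hl2, hl3, hl4⟩ :=
      shrinkB_spec a x hn hx (r0+1) (by omega) (r0 : Int) (by push_cast; ring) (a.length + 1) l
        (by omega) (by omega)
    rw [hpe]
    -- full minimality at the new left end
    have hminfull : ∀ i : Nat, i < l' → x < pref a (r0+1) - pref a i := by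
      intro i hi
      rcases Nat.lt_or_ge i l with h | h
      · have h1 := hmin i h
        have h2 : pref a r0 ≤ pref a (r0+1) := pref_mono a hn r0 (r0+1) (by omega) (by omega)
        omega
      · exact hl4 i h hi
    by_cases hhit : pref a (r0+1) - pref a l' = x ∧ 1 ≤ (r0 : Int) - (l' : Int)
    · rw [if_pos hhit]
      constructor
      · intro _; exact ⟨l', r0, by omega, hr0, le_refl r0, by omega⟩
      · intro _; rfl
    · rw [if_neg hhit]
      have hcast : (r0 : Int) + 1 = ((r0 + 1 : Nat) : Int) := by push_cast; ring
      rw [hcast, ih (r0+1) l' (by omega) (by omega) hminfull]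
      constructor
      · rintro ⟨i, j, h1, h2, h3, h4⟩
        exact ⟨i, j, h1, h2, by omega, h4⟩
      · rintro ⟨i, j, h1, h2, h3, h4⟩
        rcases Nat.lt_or_ge j (r0+1) with hj | hj
        · -- j = r0: contradiction with the failed hit test
          exfalso
          have hjr : j = r0 := by omega
          subst hjr
          rcases Nat.lt_or_ge i l' with hi | hi
          · have := hminfull i hi
            omega
          · have h5 : pref a l' ≤ pref a i := pref_mono a hn l' i hi (by omega)
            have h6 : pref a (j+1) - pref a i ≤ pref a (j+1) - pref a l' := by omega
            have h7 : pref a (j+1) - pref a l' = x := by omega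
            have h8 : ¬ (1 ≤ (j : Int) - (l' : Int)) := fun hc => hhit ⟨h7, hc⟩
            omega
        · exact ⟨i, j, h1, h2, hj, h4⟩

theorem hasWindow_char (a : List Int) (x : Int) (hn : ∀ y ∈ a, 0 ≤ y) (hx : 0 ≤ x) :
    (hasWindowB a x = true ↔ HasWin a x) := by
  unfold hasWindowB
  have h := hwLoopB_inv a x hn hx a.length 0 0 (by omega) (le_refl 0)
    (fun i hi => absurd hi (by omega))
  have h0 : pref a 0 = 0 := rfl
  rw [h0, sub_zero, Nat.cast_zero] at h
  rw [h]
  unfold HasWin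
  constructor
  · rintro ⟨i, j, h1, h2, _, h4⟩; exact ⟨i, j, h1, h2, h4⟩
  · rintro ⟨i, j, h1, h2, h4⟩; exact ⟨i, j, h1, h2, Nat.zero_le j, h4⟩

-- F) the memoising loop of B counts exactly the elements whose test succeeds
theorem solveAltLoop_eq (a : List Int) :
    ∀ (l : List Int) (cache : PySem.Dict Int Bool) (count : Int),
      (∀ k v, cache.get? k = some v → v = hasWindowB a k) →
      solveAltLoop a l cache count
        = count + ((l.countP (fun x => hasWindowB a x) : Nat) : Int) := by
  intro l
  induction l with
  | nil => intro cache count _; simp [solveAltLoop]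
  | cons x rest ih =>
    intro cache count hinv
    simp only [solveAltLoop]
    by_cases hc : PySem.Dict.contains cache x = false
    · rw [if_pos hc, PySem.Dict.get?_insert_self]
      have hinv1 : ∀ k v,
          (PySem.Dict.insert cache x (hasWindowB a x)).get? k = some v →
            v = hasWindowB a k := by
        intro k v hk
        by_cases hkx : k = x
        · subst hkx
          rw [PySem.Dict.get?_insert_self] at hk
          exact (Option.some.inj hk).symm
        · rw [PySem.Dict.get?_insert_of_ne cache _ hkx] at hk
          exact hinv k v hk
      rw [ih _ _ hinv1, List.countP_cons]
      cases hasWindowB a x <;> simp <;> ring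
    · have hsome : (cache.get? x).isSome := by
        rw [← PySem.Dict.contains_eq_isSome_get?]
        simpa using hc
      obtain ⟨v, hv⟩ := Option.isSome_iff_exists.mp hsome
      rw [if_neg hc, hv, ih _ _ hinv, List.countP_cons, hinv x v hv]
      cases hasWindowB a x <;> simp <;> ring

theorem solve_alt_eq_countP (a : List Int) :
    solve_alt a = ((a.countP (fun x => hasWindowB a x) : Nat) : Int) := by
  rw [solve_alt, solveAltLoop_eq a a PySem.Dict.empty 0
    (fun k v h => by rw [PySem.Dict.get?_empty] at h; cases h)]
  ring

-- G) assembly on the all-nonneg branch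
theorem solve_nonempty (x : Int) (t : List Int)
    (hpre : ∀ y ∈ x :: t, 0 ≤ y ∧ y ≤ 8000) :
    solve (x :: t) = solve_alt (x :: t) := by
  have hpre1 : ∀ y ∈ x :: t, (0:Int) ≤ y := fun y hy => (hpre y hy).1
  have hlen1 : (1 : Int) ≤ ((x :: t).length : Int) := by simp
  rw [solve_eq_ghost x t hpre, solve_alt_eq_countP]
  congr 1
  apply List.countP_congr
  intro y hy
  have hy0 : (0:Int) ≤ y := hpre1 y hy
  have hymx : y ≤ List.foldl max 0 (x :: t) := (PySem.List.le_foldl_max (x :: t) 0).2 y hy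
  have hmem := ghost_fold_mem (x :: t) (List.foldl max 0 (x :: t)) hpre1
    (PySem.List.pyRange 0 (((x :: t).length : Int) - 1) 1) ([] : PySem.Set Int) y
    (fun i hi => by
      have h := PySem.List.mem_pyRange_one.mp hi
      exact ⟨h.1, by omega⟩)
  have hchar := hasWindow_char (x :: t) y hpre1 hy0
  rw [contains_bool, decide_eq_true_eq]
  rw [hmem]
  constructor
  · rintro (h | ⟨i2, hi2, j', hj1, hj2, hj3, _⟩)
    · exact absurd h (by simp)
    · exact hchar.mpr ⟨i2.toNat, j', hj1, hj2, hj3⟩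
  · intro hB
    obtain ⟨i, j, h1, h2, h3⟩ := hchar.mp hB
    refine Or.inr ⟨(i : Int), ?_, j, ?_, h2, ?_, hymx⟩
    · rw [PySem.List.mem_pyRange_one]
      refine ⟨by omega, by omega⟩
    · rw [Int.toNat_natCast]; exact h1
    · rw [Int.toNat_natCast]; exact h3

-- ===== VERDICT (by name: the statement is the Claim_ definition above) =====
theorem solve_spec : Claim_equal_solve := by
  intro array _ hpre
  unfold Spec_solve
  rcases hpre with hp | ⟨hlen, _⟩
  · cases array with
    | nil => rfl
    | cons x t => exact solve_nonempty x t hp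
  · cases array with
    | nil => rfl
    | cons x t =>
      cases t with
      | nil =>
        show solve [x] = solve_alt [x]
        have h1 : solve [x] = 0 := by
          rw [solve]
          rw [show ((([x] : List Int).length : Int) - 1) = 0 by simp,
              PySem.List.pyRange_one_eq_nil (le_refl 0)]
          rfl
        have h2 : solve_alt [x] = 0 := by
          rw [solve_alt_eq_countP]
          simp only [hasWindowB]
          rw [show (([x] : List Int).length : Int) = 0 + 1 by simp,
              PySem.List.pyRange_one_singleton]
          simp only [List.countP_cons, List.countP_nil, hwLoopB, shrinkB,
            PySem.List.pyGetD_zero_cons, zero_add]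
          simp
        rw [h1, h2]
      | cons y u => simp at hlen
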